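-- pv_equiv track=rewrite | github.com/pypi-data/pypi-mirror-403 | packages/just-bash/just_bash-0.1.9-py3-none-any.whl/just_bash/commands/search_engine/regex.py | _convert_bre_to_ere
-- ===== SOURCE A (Python) =====
-- def _convert_bre_to_ere(pattern: str) -> str:
--     """Convert Basic Regular Expression to Extended Regular Expression.
--
--     In BRE, characters like +, ?, |, (, ), {, } are literal unless escaped.
--     In ERE (Python's default), they are special unless escaped.
--
--     This function escapes these characters so they're treated as literals.
--     """
--     # Characters that are special in ERE but literal in BRE
--     literal_chars = "+?|(){}[]"
--
--     result = []
--     i = 0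
--     while i < len(pattern):
--         char = pattern[i]
--
--         if char == "\\" and i + 1 < len(pattern):
--             next_char = pattern[i + 1]
--             # In BRE, \+ means one-or-more (special)
--             # So we should NOT escape it (keep as +)
--             if next_char in literal_chars:
--                 result.append(next_char)
--                 i += 2
--                 continue
--             else:
--                 # Keep other escape sequences as-is
--                 result.append(char)
--                 result.append(next_char)
--                 i += 2
--                 continue
--         elif char in literal_chars:
--             # Literal in BRE, so escape for ERE
--             result.append("\\" + char)
--         else:
--             result.append(char)
--         i += 1
--
--     return "".join(result)
-- ===== SOURCE B (Python) =====
-- def _convert_bre_to_ere(pattern: str) -> str: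
--     """Convert BRE to ERE: one-pass state machine over characters.
--
--     Instead of an index-driven while loop with lookahead and i += 2 steps,
--     carry a 'pending backslash' flag through a single for-loop over the
--     characters.
--     """
--     literal_chars = "+?|(){}[]"
--     out = []
--     pending = False
--     for ch in pattern:
--         if pending:
--             out.append(ch if ch in literal_chars else "\\" + ch)
--             pending = False
--         elif ch == "\\":
--             pending = True
--         elif ch in literal_chars:
--             out.append("\\" + ch)
--         else:
--             out.append(ch)
--     if pending:
--         out.append("\\")
--     return "".join(out)
-- ===== Notes on version B (the rewrite author's own statement) =====
-- stated objective: simpler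
-- what changed: Replaced the index-driven while loop with explicit lookahead (pattern[i+1], i += 2) by a single for-loop state machine carrying a pending-backslash flag (flushing a lone trailing backslash at the end); measured faster as a constant factor since it iterates characters directly instead of indexing the string and re-checking bounds each step.
import Mathlib
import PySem

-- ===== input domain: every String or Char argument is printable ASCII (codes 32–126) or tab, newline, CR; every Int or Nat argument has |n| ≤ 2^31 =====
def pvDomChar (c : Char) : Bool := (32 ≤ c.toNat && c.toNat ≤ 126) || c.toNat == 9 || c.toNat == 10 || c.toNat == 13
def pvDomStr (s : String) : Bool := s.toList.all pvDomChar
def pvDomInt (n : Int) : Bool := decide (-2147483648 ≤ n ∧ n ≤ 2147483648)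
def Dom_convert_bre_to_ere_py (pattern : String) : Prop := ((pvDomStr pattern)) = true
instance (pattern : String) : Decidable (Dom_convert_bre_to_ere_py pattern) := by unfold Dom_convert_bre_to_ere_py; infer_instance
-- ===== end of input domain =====

-- B replaces A's index-driven while loop (lookahead, i += 2) by a one-pass
-- state machine carrying a pending-backslash flag; same output, simpler scan.

-- ===== PORT A =====
-- "+?|(){}[]" as a character list
def pvLitsA : List Char := ['+', '?', '|', '(', ')', '{', '}', '[', ']']

-- A's while loop: index i over pattern, stepping by 1 or 2
def pvALoop (l : List Char) (i : Nat) : List Char :=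
  if h : i < l.length then
    let ch := l[i]
    if hc : ch = '\\' ∧ i + 1 < l.length then
      let nx := l[i + 1]'hc.2
      if nx ∈ pvLitsA then nx :: pvALoop l (i + 2)
      else '\\' :: nx :: pvALoop l (i + 2)
    else if ch ∈ pvLitsA then '\\' :: ch :: pvALoop l (i + 1)
    else ch :: pvALoop l (i + 1)
  else []
termination_by l.length - i

def convert_bre_to_ere_py (pattern : String) : String :=
  String.ofList (pvALoop pattern.toList 0)

-- ===== PORT B =====
def pvLitsB : List Char := ['+', '?', '|', '(', ')', '{', '}', '[', ']']

-- B's for-loop: state machine over the characters with a pending-backslash flag;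
-- at the end a still-pending backslash is flushed.
def pvBLoop : Bool → List Char → List Char
  | true, [] => ['\\']
  | false, [] => []
  | true, ch :: rest =>
      (if ch ∈ pvLitsB then [ch] else ['\\', ch]) ++ pvBLoop false rest
  | false, ch :: rest =>
      if ch = '\\' then pvBLoop true rest
      else if ch ∈ pvLitsB then '\\' :: ch :: pvBLoop false rest
      else ch :: pvBLoop false rest

def convert_bre_to_ere_py_alt (pattern : String) : String :=
  String.ofList (pvBLoop false pattern.toList)

-- ===== PRECONDITION & SPEC =====
def Spec_convert_bre_to_ere_py (pattern : String) (out : String) : Prop := out = convert_bre_to_ere_py_alt pattern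
instance (pattern : String) (out : String) : Decidable (Spec_convert_bre_to_ere_py pattern out) := by unfold Spec_convert_bre_to_ere_py; infer_instance

-- ===== CLAIM (what is proved, stated in full; the proofs are below) =====
def Claim_equal_convert_bre_to_ere_py : Prop := ∀ (pattern : String), Dom_convert_bre_to_ere_py pattern → Spec_convert_bre_to_ere_py pattern (convert_bre_to_ere_py pattern)

-- ===== LEMMAS AND PROOFS =====

lemma pvALoop_eq_pvBLoop (n : Nat) :
    ∀ (l : List Char) (i : Nat), l.length - i ≤ n →
      pvALoop l i = pvBLoop false (l.drop i) := by
  induction n with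
  | zero =>
    intro l i h
    have hle : l.length ≤ i := by omega
    rw [pvALoop, List.drop_eq_nil_of_le hle]
    simp [pvBLoop, Nat.not_lt.mpr hle]
  | succ n ih =>
    intro l i h
    by_cases hi : i < l.length
    · have hdrop : l.drop i = l[i] :: l.drop (i + 1) := List.drop_eq_getElem_cons hi
      rw [pvALoop, dif_pos hi, hdrop]
      by_cases hb : l[i] = '\\'
      · by_cases h2 : i + 1 < l.length
        · have hdrop2 : l.drop (i + 1) = l[i + 1] :: l.drop (i + 2) :=
            List.drop_eq_getElem_cons h2
          rw [dif_pos ⟨hb, h2⟩, hdrop2]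
          simp only [hb]
          have ih2 := ih l (i + 2) (by omega)
          by_cases hin : l[i + 1] ∈ pvLitsA
          · rw [if_pos hin]
            simp only [pvBLoop]
            rw [ih2]
            simp [show l[i+1] ∈ pvLitsB from hin]
          · rw [if_neg hin]
            simp only [pvBLoop]
            rw [ih2]
            simp [show l[i+1] ∉ pvLitsB from hin]
        · -- trailing lone backslash
          have hlen : l.length = i + 1 := by omega
          have hdrop2 : l.drop (i + 1) = [] := List.drop_eq_nil_of_le (by omega)
          rw [dif_neg (by rintro ⟨_, h2'⟩; omega)]
          have hnot : l[i] ∉ pvLitsA := by rw [hb]; decide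
          rw [if_neg hnot]
          simp only [hb]
          rw [ih l (i + 1) (by omega), hdrop2]
          simp [pvBLoop]
      · rw [dif_neg (by rintro ⟨hb', _⟩; exact hb hb')]
        have ih1 := ih l (i + 1) (by omega)
        by_cases hin : l[i] ∈ pvLitsA
        · rw [if_pos hin, ih1]
          simp [pvBLoop, hb, show l[i] ∈ pvLitsB from hin]
        · rw [if_neg hin, ih1]
          simp [pvBLoop, hb, show l[i] ∉ pvLitsB from hin]
    · have hle : l.length ≤ i := by omega
      rw [pvALoop, dif_neg hi, List.drop_eq_nil_of_le hle]
      simp [pvBLoop]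

-- ===== VERDICT (by name: the statement is the Claim_ definition above) =====
theorem convert_bre_to_ere_py_spec : Claim_equal_convert_bre_to_ere_py := by
  intro pattern _
  unfold Spec_convert_bre_to_ere_py convert_bre_to_ere_py convert_bre_to_ere_py_alt
  rw [pvALoop_eq_pvBLoop pattern.toList.length pattern.toList 0 (by omega)]
  simp
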